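-- pv_equiv track=rewrite | github.com/alexanderheilman/recipe-vectorizer | functions.py | _remove_descriptors
-- ===== SOURCE A (Python) =====
-- import string
--
-- phrases = [' - ',', or', ', for garnish', ', cut', ' such as', ' like', 'e.g.']
--
-- stopwords = ['and', 'into', 'very', 'hot', 'cold', 'fresh', 'large', 'medium', 'small', 'halves', 'torn', 'bulk']
--
-- suffixes = ['ed','less','ly']
--
-- def _remove_descriptors(item,
--                         phrases=phrases,
--                         stopwords=stopwords,
--                         suffixes=suffixes):
--     # Remove common/unnecessary ending phrases
--     for phrase in phrases:
--         if len(item.split(phrase)) > 1: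
--             item = item.split(phrase)[0]
--     # Remove punctuation and stopwords
--     words = []
--     for elem in item.split():
--         word = ''.join([letter for letter in elem.lower() if letter in string.ascii_lowercase])
--         if word not in stopwords:
--             words.append(word)
--     # Remove adjectives and adverbs
--     for suffix in suffixes:
--         for word in words.copy():
--             try:
--                 if (word[-len(suffix):] == suffix) and word != 'red':
--                     words.remove(word)
--             except:
--                 continue
--     return ' '.join(words)
-- ===== SOURCE B (Python) =====
-- import string
--
-- phrases = [' - ',', or', ', for garnish', ', cut', ' such as', ' like', 'e.g.']
--
-- stopwords = ['and', 'into', 'very', 'hot', 'cold', 'fresh', 'large', 'medium', 'small', 'halves', 'torn', 'bulk']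
--
-- suffixes = ['ed','less','ly']
--
-- def _remove_descriptors(item,
--                         phrases=phrases,
--                         stopwords=stopwords,
--                         suffixes=suffixes):
--     # Remove common/unnecessary ending phrases
--     for phrase in phrases:
--         if len(item.split(phrase)) > 1:
--             item = item.split(phrase)[0]
--     # Single pass: clean each token and keep it unless it is a stopword or
--     # carries one of the adjective/adverb suffixes (with the 'red' exception).
--     def clean(tok):
--         return ''.join(c for c in tok.lower() if c in string.ascii_lowercase)
--     kept = [w for w in map(clean, item.split())
--             if w not in stopwords
--             and not (w != 'red' and any(w[-len(s):] == s for s in suffixes))]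
--     return ' '.join(kept)
-- ===== Notes on version B (the rewrite author's own statement) =====
-- stated objective: simpler
-- what changed: Replaces A's append-loop over tokens plus three destructive suffix passes (words.copy() + list.remove inside try/except) by one map+filter comprehension that keeps a token iff its cleaned word is neither a stopword nor a non-'red' word matching some suffix.
-- outside the precondition, e.g. on _remove_descriptors('a b', [''], [], []): A raises ValueError, B raises ValueError
import Mathlib
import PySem

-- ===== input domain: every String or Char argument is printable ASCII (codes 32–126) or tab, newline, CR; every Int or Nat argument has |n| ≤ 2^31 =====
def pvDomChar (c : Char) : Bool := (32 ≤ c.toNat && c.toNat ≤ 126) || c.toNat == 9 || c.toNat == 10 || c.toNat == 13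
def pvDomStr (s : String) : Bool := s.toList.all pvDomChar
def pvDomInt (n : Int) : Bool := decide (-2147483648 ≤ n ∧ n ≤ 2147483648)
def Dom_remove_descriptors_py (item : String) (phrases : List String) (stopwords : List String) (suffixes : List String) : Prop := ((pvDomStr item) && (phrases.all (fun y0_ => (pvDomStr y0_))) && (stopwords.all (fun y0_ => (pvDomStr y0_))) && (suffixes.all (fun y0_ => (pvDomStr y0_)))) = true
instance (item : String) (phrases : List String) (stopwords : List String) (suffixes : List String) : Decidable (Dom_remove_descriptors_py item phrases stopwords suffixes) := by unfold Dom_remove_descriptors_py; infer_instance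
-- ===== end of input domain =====

-- B merges A's stopword pass and its three destructive suffix passes (copy + .remove)
-- into one map+filter comprehension over the tokens; same return value, simpler decomposition.


-- ===== PORT A =====
-- shared helper: phase 1 of both Pythons is identical ('for phrase in phrases: if len(item.split(phrase)) > 1: item = item.split(phrase)[0]')
def rdPhase1 (item : String) (phrases : List String) : String :=
  phrases.foldl (fun it phrase =>
    match PySem.Str.split? it phrase with
    | none => it            -- phrase = "": Python raises ValueError; excluded by Pre_
    | some parts => if parts.length > 1 then parts.headD it else it) item

-- shared helper: ''.join([letter for letter in elem.lower() if letter in string.ascii_lowercase])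
def rdClean (elem : String) : String :=
  String.ofList ((PySem.Chars.lower elem.toList).filter (fun c => 'a' ≤ c && c ≤ 'z'))

-- shared helper: word[-len(suffix):] == suffix (Python slicing; total)
def rdSuffixHit (word suffix : String) : Bool :=
  PySem.List.slice word.toList (some (-(suffix.toList.length : Int))) none == suffix.toList

def remove_descriptors_py (item : String) (phrases : List String) (stopwords : List String) (suffixes : List String) : String :=
  let item := rdPhase1 item phrases
  -- words = []; for elem in item.split(): word = clean(elem); if word not in stopwords: words.append(word)
  let words : List String := (PySem.Str.split₀ item).foldl
    (fun ws elem =>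
      let word := rdClean elem
      if stopwords.contains word then ws else ws ++ [word]) []
  -- for suffix in suffixes: for word in words.copy(): try: if word[-len(suffix):] == suffix and word != 'red': words.remove(word) except: continue
  let words := suffixes.foldl
    (fun ws suffix =>
      ws.foldl (fun cur word =>
        if rdSuffixHit word suffix && word != "red" then
          match PySem.List.remove? cur word with
          | some cur' => cur'
          | none => cur      -- ValueError swallowed by 'except: continue' (unreachable)
        else cur) ws) words
  PySem.Str.join " " words

-- ===== PORT B =====
def remove_descriptors_py_alt (item : String) (phrases : List String) (stopwords : List String) (suffixes : List String) : String :=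
  let item := rdPhase1 item phrases
  -- kept = [w for w in map(clean, item.split()) if w not in stopwords and not (w != 'red' and any(w[-len(s):] == s for s in suffixes))]
  let kept : List String := ((PySem.Str.split₀ item).map rdClean).filter
    (fun w => !stopwords.contains w && !(w != "red" && suffixes.any (fun s => rdSuffixHit w s)))
  PySem.Str.join " " kept

-- ===== PRECONDITION & SPEC =====
-- Pre_ excludes exactly the inputs where phrases contains "": there item.split('') raises
-- ValueError in both A and B.
def Pre_remove_descriptors_py (item : String) (phrases : List String) (stopwords : List String) (suffixes : List String) : Prop :=
  "" ∉ phrases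
instance (item : String) (phrases : List String) (stopwords : List String) (suffixes : List String) : Decidable (Pre_remove_descriptors_py item phrases stopwords suffixes) := by unfold Pre_remove_descriptors_py; infer_instance

def pvWitness_remove_descriptors_py : String × List String × List String × List String :=
  ("1 Fresh red onion, cut into thin slices, or chopped", [" - ", ", or", ", cut"], ["and", "into", "fresh"], ["ed", "less", "ly"])

def Spec_remove_descriptors_py (item : String) (phrases : List String) (stopwords : List String) (suffixes : List String) (out : String) : Prop := out = remove_descriptors_py_alt item phrases stopwords suffixes
instance (item : String) (phrases : List String) (stopwords : List String) (suffixes : List String) (out : String) : Decidable (Spec_remove_descriptors_py item phrases stopwords suffixes out) := by unfold Spec_remove_descriptors_py; infer_instance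

-- ===== CLAIM (what is proved, stated in full; the proofs are below) =====
def Claim_equal_remove_descriptors_py : Prop := ∀ (item : String) (phrases : List String) (stopwords : List String) (suffixes : List String), Dom_remove_descriptors_py item phrases stopwords suffixes → Pre_remove_descriptors_py item phrases stopwords suffixes → Spec_remove_descriptors_py item phrases stopwords suffixes (remove_descriptors_py item phrases stopwords suffixes)

-- ===== LEMMAS AND PROOFS =====

-- A's stopword loop builds exactly the filtered map.
lemma rd_phase2 (p : String → Bool) (f : String → String) :
    ∀ (toks : List String) (acc : List String),
      toks.foldl (fun ws elem =>
        let word := f elem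
        if p word then ws else ws ++ [word]) acc
      = acc ++ (toks.map f).filter (fun w => !p w) := by
  intro toks
  induction toks with
  | nil => intro acc; simp
  | cons e ts ih =>
      intro acc
      cases h : p (f e) <;> simp [List.foldl_cons, h, ih]

-- removing the first occurrence of w from acc ++ w :: l when w ∉ acc
lemma rd_remove_app (w : String) :
    ∀ (acc l : List String), w ∉ acc →
      PySem.List.remove? (acc ++ w :: l) w = some (acc ++ l) := by
  intro acc
  induction acc with
  | nil => intro l _; simp [PySem.List.remove?_cons_self]
  | cons a acc ih =>
      intro l h
      have ha : a ≠ w := by intro e; exact h (by simp [e])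
      have := PySem.List.remove?_cons_of_ne (xs := acc ++ w :: l) (v := w) ha
      simp [this, ih l (fun hm => h (List.mem_cons_of_mem a hm))]

-- one destructive '.remove' pass over a copy equals one filter
lemma rd_pass (p : String → Bool) :
    ∀ (l acc : List String), (∀ x ∈ acc, p x = false) →
      l.foldl (fun cur word =>
        if p word then
          match PySem.List.remove? cur word with
          | some cur' => cur'
          | none => cur
        else cur) (acc ++ l)
      = acc ++ l.filter (fun w => !p w) := by
  intro l
  induction l with
  | nil => intro acc _; simp
  | cons w l' ih =>
      intro acc hacc
      by_cases hp : p w = true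
      · have hw : w ∉ acc := fun hm => by simp [hacc w hm] at hp
        simp only [List.foldl_cons, hp, if_true, rd_remove_app w acc l' hw]
        simpa [hp] using ih acc hacc
      · simp only [Bool.not_eq_true] at hp
        have : acc ++ w :: l' = (acc ++ [w]) ++ l' := by simp
        have hacc' : ∀ x ∈ acc ++ [w], p x = false := by
          intro x hx
          rcases List.mem_append.mp hx with h1 | h1
          · exact hacc x h1
          · simp at h1; simpa [h1] using hp
        simp only [List.foldl_cons, hp, Bool.false_eq_true, if_false]
        rw [this, ih (acc ++ [w]) hacc']
        simp [hp]

-- folding filters over the suffix list equals one filter by the conjunction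
lemma rd_fold_filter (q : String → String → Bool) :
    ∀ (sfx : List String) (ws : List String),
      sfx.foldl (fun ws s => ws.filter (fun w => !q w s)) ws
      = ws.filter (fun w => sfx.all (fun s => !q w s)) := by
  intro sfx
  induction sfx with
  | nil => intro ws; simp
  | cons s ss ih =>
      intro ws
      simp only [List.foldl_cons, ih, List.filter_filter, List.all_cons]
      apply List.filter_congr
      intro w _
      cases q w s <;> simp

-- the merged keep-test of B equals A's conjunction of per-suffix tests
lemma rd_pred (w : String) (sfx : List String) :
    (sfx.all (fun s => !(rdSuffixHit w s && w != "red")))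
      = !(w != "red" && sfx.any (fun s => rdSuffixHit w s)) := by
  cases h : (w != "red")
  · simp
  · simp only [Bool.and_true, Bool.true_and]
    induction sfx with
    | nil => simp
    | cons s ss ih => simp [ih, Bool.not_or]

-- ===== VERDICT (by name: the statement is the Claim_ definition above) =====
theorem remove_descriptors_py_spec : Claim_equal_remove_descriptors_py := by
  intro item phrases stopwords suffixes _ _
  unfold Spec_remove_descriptors_py remove_descriptors_py remove_descriptors_py_alt
  simp only []
  rw [rd_phase2 stopwords.contains rdClean (PySem.Str.split₀ (rdPhase1 item phrases)) []]
  have hstep : (fun (ws : List String) (suffix : String) =>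
      ws.foldl (fun cur word =>
        if rdSuffixHit word suffix && word != "red" then
          match PySem.List.remove? cur word with
          | some cur' => cur'
          | none => cur
        else cur) ws)
      = (fun (ws : List String) (s : String) =>
          ws.filter (fun w => !(rdSuffixHit w s && w != "red"))) := by
    funext ws s
    have := rd_pass (fun w => rdSuffixHit w s && w != "red") ws [] (by simp)
    simpa using this
  rw [hstep, rd_fold_filter (fun w s => rdSuffixHit w s && w != "red") suffixes]
  simp only [List.nil_append, List.filter_filter]
  apply congrArg
  apply List.filter_congr
  intro w _
  rw [rd_pred w suffixes]
  cases hc : stopwords.contains w <;> simp [Bool.and_comm]
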